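-- pv_equiv track=rewrite | github.com/scooper4711/chronicle2layout | blueprint2layout/detection.py | _group_consecutive_rows
-- ===== SOURCE A (Python) =====
-- LINE_GROUPING_TOLERANCE = 5
--
-- def _group_consecutive_rows(
--     qualifying_rows: list[tuple[int, int, int]],
-- ) -> list[list[tuple[int, int, int]]]:
--     """Group qualifying rows where gaps are within the grouping tolerance.
--
--     Args:
--         qualifying_rows: Sorted list of (row_index, left, right) tuples.
--
--     Returns:
--         List of groups, where each group is a list of row tuples.
--     """
--     if not qualifying_rows:
--         return []
--
--     groups: list[list[tuple[int, int, int]]] = []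
--     current_group = [qualifying_rows[0]]
--
--     for row_data in qualifying_rows[1:]:
--         previous_row_idx = current_group[-1][0]
--         current_row_idx = row_data[0]
--
--         if current_row_idx - previous_row_idx <= LINE_GROUPING_TOLERANCE:
--             current_group.append(row_data)
--         else:
--             groups.append(current_group)
--             current_group = [row_data]
--
--     groups.append(current_group)
--     return groups
-- ===== SOURCE B (Python) =====
-- LINE_GROUPING_TOLERANCE = 5
--
-- def _group_consecutive_rows(qualifying_rows):
--     """Two-phase: first compute the run length of each group from adjacent
--     index gaps, then partition the list by those run lengths."""
--     if not qualifying_rows: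
--         return []
--     sizes = []
--     run = 1
--     for prev, cur in zip(qualifying_rows, qualifying_rows[1:]):
--         if cur[0] - prev[0] > LINE_GROUPING_TOLERANCE:
--             sizes.append(run)
--             run = 1
--         else:
--             run += 1
--     sizes.append(run)
--     groups = []
--     rest = qualifying_rows
--     for s in sizes:
--         groups.append(rest[:s])
--         rest = rest[s:]
--     return groups
-- ===== Notes on version B (the rewrite author's own statement) =====
-- stated objective: alternative
-- what changed: Replaces A's single accumulate-into-current-group loop by a two-phase decomposition: one pass over adjacent pairs computes each group's run length, then a second pass partitions the list by those lengths.
import Mathlib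
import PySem

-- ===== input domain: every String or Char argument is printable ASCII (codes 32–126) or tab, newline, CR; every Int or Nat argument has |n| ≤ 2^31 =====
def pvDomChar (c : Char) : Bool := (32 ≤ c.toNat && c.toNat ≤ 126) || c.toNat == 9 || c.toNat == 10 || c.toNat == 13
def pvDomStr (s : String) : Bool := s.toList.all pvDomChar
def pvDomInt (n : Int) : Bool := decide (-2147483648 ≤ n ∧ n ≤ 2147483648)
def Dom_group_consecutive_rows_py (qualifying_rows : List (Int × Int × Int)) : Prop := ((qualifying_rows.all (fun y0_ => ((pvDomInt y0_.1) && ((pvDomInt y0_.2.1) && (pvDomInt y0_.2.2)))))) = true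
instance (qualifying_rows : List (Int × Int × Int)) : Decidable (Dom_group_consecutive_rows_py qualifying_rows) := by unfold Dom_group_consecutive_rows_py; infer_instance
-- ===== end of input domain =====

-- B replaces A's accumulate-into-current-group loop by a two-phase decomposition
-- (compute the run length of each group from adjacent gaps, then partition the
-- list by those lengths); objective: alternative decomposition, same O(n) cost.

def LINE_GROUPING_TOLERANCE : Int := 5

-- ===== PORT A =====
-- state = (groups, current_group); current_group is never empty, so Python's
-- current_group[-1] is ported exactly as getLastD.
def group_consecutive_rows_py (qualifying_rows : List (Int × Int × Int)) : List (List (Int × Int × Int)) :=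
  match qualifying_rows with
  | [] => []
  | r0 :: rest =>
    let st := rest.foldl
      (fun (st : List (List (Int × Int × Int)) × List (Int × Int × Int)) row_data =>
        if row_data.1 - (st.2.getLastD (0, 0, 0)).1 ≤ LINE_GROUPING_TOLERANCE then
          (st.1, st.2 ++ [row_data])
        else
          (st.1 ++ [st.2], [row_data]))
      ([], [r0])
    st.1 ++ [st.2]

-- ===== PORT B =====
-- phase 1: run lengths from adjacent gaps; phase 2: partition by those lengths.
-- the run counter s is always ≥ 1, so Python's rest[:s] / rest[s:] are exactly take / drop.
def group_consecutive_rows_py_alt (qualifying_rows : List (Int × Int × Int)) : List (List (Int × Int × Int)) :=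
  match qualifying_rows with
  | [] => []
  | _ :: tail =>
    let st1 := (qualifying_rows.zip tail).foldl
      (fun (st : List Nat × Nat) pc =>
        if pc.2.1 - pc.1.1 > LINE_GROUPING_TOLERANCE then (st.1 ++ [st.2], 1)
        else (st.1, st.2 + 1))
      ([], 1)
    let sizes := st1.1 ++ [st1.2]
    (sizes.foldl
      (fun (st : List (List (Int × Int × Int)) × List (Int × Int × Int)) s =>
        (st.1 ++ [st.2.take s], st.2.drop s))
      ([], qualifying_rows)).1

-- ===== PRECONDITION & SPEC =====
def Spec_group_consecutive_rows_py (qualifying_rows : List (Int × Int × Int)) (out : List (List (Int × Int × Int))) : Prop := out = group_consecutive_rows_py_alt qualifying_rows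
instance (qualifying_rows : List (Int × Int × Int)) (out : List (List (Int × Int × Int))) : Decidable (Spec_group_consecutive_rows_py qualifying_rows out) := by unfold Spec_group_consecutive_rows_py; infer_instance

-- ===== CLAIM (what is proved, stated in full; the proofs are below) =====
def Claim_equal_group_consecutive_rows_py : Prop := ∀ (qualifying_rows : List (Int × Int × Int)), Dom_group_consecutive_rows_py qualifying_rows → Spec_group_consecutive_rows_py qualifying_rows (group_consecutive_rows_py qualifying_rows)

-- ===== LEMMAS AND PROOFS =====

-- partition a list by a list of chunk sizes
def pvChunks : List Nat → List (Int × Int × Int) → List (List (Int × Int × Int))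
  | [], _ => []
  | s :: ss, rest => rest.take s :: pvChunks ss (rest.drop s)

-- add k to the head of a size list
def pvConsAdd (k : Nat) : List Nat → List Nat
  | [] => [k]
  | s :: ss => (k + s) :: ss

-- pvTr p rest = run lengths of the grouping of rest, where the first run counts
-- only the elements of rest that continue the run ending at p (hence may be 0)
def pvTr : (Int × Int × Int) → List (Int × Int × Int) → List Nat
  | _, [] => [0]
  | p, x :: t =>
    if x.1 - p.1 > 5 then 0 :: pvConsAdd 1 (pvTr x t)
    else pvConsAdd 1 (pvTr x t)

-- the grouping whose first group is cur extended by the first run of rest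
def pvGlue (cur : List (Int × Int × Int)) : List Nat → List (Int × Int × Int) → List (List (Int × Int × Int))
  | [], _ => [cur]
  | h :: hs, rest => (cur ++ rest.take h) :: pvChunks hs (rest.drop h)

theorem pvConsAdd_consAdd (k : Nat) (l : List Nat) :
    pvConsAdd k (pvConsAdd 1 l) = pvConsAdd (k + 1) l := by
  cases l <;> simp [pvConsAdd, Nat.add_assoc]

theorem pvChunks_consAdd_one (l : List Nat) (r : Int × Int × Int) (rest : List (Int × Int × Int)) :
    pvChunks (pvConsAdd 1 l) (r :: rest) = pvGlue [r] l rest := by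
  cases l with
  | nil => simp [pvConsAdd, pvChunks, pvGlue]
  | cons h hs => simp [pvConsAdd, pvChunks, pvGlue, Nat.add_comm 1 h]

-- phase 2 of B builds exactly pvChunks
theorem pvPhase2 (ss : List Nat) (gs0 : List (List (Int × Int × Int))) (rest : List (Int × Int × Int)) :
    (ss.foldl
      (fun (st : List (List (Int × Int × Int)) × List (Int × Int × Int)) s =>
        (st.1 ++ [st.2.take s], st.2.drop s))
      (gs0, rest)).1 = gs0 ++ pvChunks ss rest := by
  induction ss generalizing gs0 rest with
  | nil => simp [pvChunks]
  | cons s ss ih => simp [List.foldl, pvChunks, ih]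

-- phase 1 of B computes pvConsAdd k ∘ pvTr
theorem pvPhase1 (rest : List (Int × Int × Int)) (r : Int × Int × Int) (s0 : List Nat) (k : Nat) :
    (((r :: rest).zip rest).foldl
      (fun (st : List Nat × Nat) pc =>
        if pc.2.1 - pc.1.1 > LINE_GROUPING_TOLERANCE then (st.1 ++ [st.2], 1)
        else (st.1, st.2 + 1))
      (s0, k)).1 ++
    [(((r :: rest).zip rest).foldl
      (fun (st : List Nat × Nat) pc =>
        if pc.2.1 - pc.1.1 > LINE_GROUPING_TOLERANCE then (st.1 ++ [st.2], 1)
        else (st.1, st.2 + 1))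
      (s0, k)).2] = s0 ++ pvConsAdd k (pvTr r rest) := by
  induction rest generalizing r s0 k with
  | nil => simp [pvTr, pvConsAdd]
  | cons x t ih =>
    simp only [LINE_GROUPING_TOLERANCE] at ih ⊢
    simp only [List.zip_cons_cons, List.foldl_cons]
    by_cases h : x.1 - r.1 > 5
    · rw [if_pos h, ih x (s0 ++ [k]) 1]
      cases htr : pvTr x t <;> simp [pvTr, h, htr, pvConsAdd]
    · rw [if_neg h, ih x s0 (k + 1)]
      simp [pvTr, h, pvConsAdd_consAdd]

-- A's loop builds groups ++ pvGlue cur (pvTr p rest) rest when p is the last of cur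
theorem pvLoopA (rest : List (Int × Int × Int)) (groups : List (List (Int × Int × Int)))
    (cur : List (Int × Int × Int)) (p : Int × Int × Int) (hp : cur.getLast? = some p) :
    (rest.foldl
      (fun (st : List (List (Int × Int × Int)) × List (Int × Int × Int)) row_data =>
        if row_data.1 - (st.2.getLastD (0, 0, 0)).1 ≤ LINE_GROUPING_TOLERANCE then
          (st.1, st.2 ++ [row_data])
        else
          (st.1 ++ [st.2], [row_data]))
      (groups, cur)).1 ++
    [(rest.foldl
      (fun (st : List (List (Int × Int × Int)) × List (Int × Int × Int)) row_data =>
        if row_data.1 - (st.2.getLastD (0, 0, 0)).1 ≤ LINE_GROUPING_TOLERANCE then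
          (st.1, st.2 ++ [row_data])
        else
          (st.1 ++ [st.2], [row_data]))
      (groups, cur)).2] = groups ++ pvGlue cur (pvTr p rest) rest := by
  induction rest generalizing groups cur p with
  | nil => simp [pvTr, pvGlue, pvChunks]
  | cons x t ih =>
    have hlastD : cur.getLastD (0, 0, 0) = p := by
      simp [List.getLastD_eq_getLast?, hp]
    simp only [LINE_GROUPING_TOLERANCE] at ih ⊢
    simp only [List.foldl_cons, hlastD]
    by_cases h : x.1 - p.1 > 5
    · rw [if_neg (by omega : ¬ x.1 - p.1 ≤ 5), ih (groups ++ [cur]) [x] x (by simp)]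
      simp [pvTr, h, pvGlue, pvChunks_consAdd_one]
    · rw [if_pos (by omega : x.1 - p.1 ≤ 5), ih groups (cur ++ [x]) x (by simp)]
      cases htr : pvTr x t with
      | nil => simp [pvTr, h, htr, pvGlue, pvConsAdd, pvChunks]
      | cons h0 hs =>
        simp [pvTr, h, htr, pvGlue, pvConsAdd, Nat.add_comm 1 h0, List.take_succ_cons,
          List.drop_succ_cons, List.append_assoc]

-- ===== VERDICT (by name: the statement is the Claim_ definition above) =====
theorem group_consecutive_rows_py_spec : Claim_equal_group_consecutive_rows_py := by
  intro qualifying_rows _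
  unfold Spec_group_consecutive_rows_py
  cases qualifying_rows with
  | nil => rfl
  | cons r rest =>
    simp only [group_consecutive_rows_py, group_consecutive_rows_py_alt]
    rw [pvLoopA rest [] [r] r (by simp), pvPhase2, pvPhase1 rest r [] 1]
    rw [List.nil_append, List.nil_append, List.nil_append, pvChunks_consAdd_one]
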